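-- pv_equiv track=rewrite | github.com/fwornle/agentic-ai-nano | docs-content/02_rag/src/session6/graph_traversal_engine.py | _join_with_connectors
-- ===== SOURCE A (Python) =====
-- from typing import Dict, List, Any, Tuple
--
-- def _join_with_connectors(narrative_parts: List[str]) -> str:
--     """Join narrative parts with appropriate connectors."""
--
--     if len(narrative_parts) == 1:
--         return narrative_parts[0]
--     elif len(narrative_parts) == 2:
--         return f"{narrative_parts[0]}, which {narrative_parts[1]}"
--     else:
--         result = narrative_parts[0]
--         for i, part in enumerate(narrative_parts[1:], 1):
--             if i == len(narrative_parts) - 1: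
--                 result += f", and {part}"
--             else:
--                 result += f", which {part}"
--         return result
-- ===== SOURCE B (Python) =====
-- from typing import List
--
--
-- def _join_with_connectors(narrative_parts: List[str]) -> str:
--     """Join narrative parts with appropriate connectors."""
--
--     if len(narrative_parts) == 1:
--         return narrative_parts[0]
--     if len(narrative_parts) == 2:
--         return f"{narrative_parts[0]}, which {narrative_parts[1]}"
--     return ", which ".join(narrative_parts[:-1]) + ", and " + narrative_parts[-1]
-- ===== Notes on version B (the rewrite author's own statement) =====
-- stated objective: simpler
-- what changed: The general case's index-tracking accumulator loop is replaced by a single ', which '.join over narrative_parts[:-1] with the last element appended after ', and '.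
import Mathlib
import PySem

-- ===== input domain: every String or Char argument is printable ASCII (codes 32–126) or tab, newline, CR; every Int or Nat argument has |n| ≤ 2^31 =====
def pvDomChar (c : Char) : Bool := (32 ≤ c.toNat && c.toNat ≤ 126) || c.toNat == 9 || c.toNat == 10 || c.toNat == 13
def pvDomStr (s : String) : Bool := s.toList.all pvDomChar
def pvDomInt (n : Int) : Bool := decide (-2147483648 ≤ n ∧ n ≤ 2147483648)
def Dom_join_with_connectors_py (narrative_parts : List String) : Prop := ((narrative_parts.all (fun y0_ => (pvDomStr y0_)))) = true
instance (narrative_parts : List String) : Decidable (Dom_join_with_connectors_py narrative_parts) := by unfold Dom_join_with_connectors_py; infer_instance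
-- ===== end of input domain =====

-- B replaces A's index-tracking accumulator loop by one ", which ".join over parts[:-1]
-- plus the last element after ", and " (objective: simpler).


-- ===== PORT A =====
-- the 'for i, part in enumerate(narrative_parts[1:], 1)' loop, accumulating into result
def pvLoopA (n : Nat) : List (Int × String) → String → String
  | [], result => result
  | (i, part) :: rest, result =>
      if i = (n : Int) - 1 then pvLoopA n rest (result ++ ", and " ++ part)
      else pvLoopA n rest (result ++ ", which " ++ part)

def join_with_connectors_py (narrative_parts : List String) : String :=
  if narrative_parts.length = 1 then PySem.List.pyGetD narrative_parts 0 ""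
  else if narrative_parts.length = 2 then
    PySem.List.pyGetD narrative_parts 0 "" ++ ", which " ++ PySem.List.pyGetD narrative_parts 1 ""
  else
    pvLoopA narrative_parts.length
      (PySem.List.enumerate (PySem.List.slice narrative_parts (some 1) none) 1)
      (PySem.List.pyGetD narrative_parts 0 "")

-- ===== PORT B =====
def join_with_connectors_py_alt (narrative_parts : List String) : String :=
  if narrative_parts.length = 1 then PySem.List.pyGetD narrative_parts 0 ""
  else if narrative_parts.length = 2 then
    PySem.List.pyGetD narrative_parts 0 "" ++ ", which " ++ PySem.List.pyGetD narrative_parts 1 ""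
  else
    PySem.Str.join ", which " (PySem.List.slice narrative_parts none (some (-1)))
      ++ ", and " ++ PySem.List.pyGetD narrative_parts (-1) ""

-- ===== PRECONDITION & SPEC =====
-- Pre_ excludes only the empty list, on which both Pythons raise IndexError.
def Pre_join_with_connectors_py (narrative_parts : List String) : Prop := narrative_parts ≠ []
instance (narrative_parts : List String) : Decidable (Pre_join_with_connectors_py narrative_parts) := by unfold Pre_join_with_connectors_py; infer_instance
def pvWitness_join_with_connectors_py : List String := ["a"]

def Spec_join_with_connectors_py (narrative_parts : List String) (out : String) : Prop := out = join_with_connectors_py_alt narrative_parts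
instance (narrative_parts : List String) (out : String) : Decidable (Spec_join_with_connectors_py narrative_parts out) := by unfold Spec_join_with_connectors_py; infer_instance

-- ===== CLAIM (what is proved, stated in full; the proofs are below) =====
def Claim_equal_join_with_connectors_py : Prop := ∀ (narrative_parts : List String), Dom_join_with_connectors_py narrative_parts → Pre_join_with_connectors_py narrative_parts → Spec_join_with_connectors_py narrative_parts (join_with_connectors_py narrative_parts)

-- ===== LEMMAS AND PROOFS =====

-- absorbing one joined element into the head of a join
theorem pvJoin_shift (sep a x : List Char) (l : List (List Char)) :
    PySem.Chars.join sep ((a ++ (sep ++ x)) :: l) = a ++ (sep ++ PySem.Chars.join sep (x :: l)) := by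
  cases l with
  | nil => simp [PySem.Chars.join_singleton]
  | cons z l' =>
      rw [PySem.Chars.join_cons_cons, PySem.Chars.join_cons_cons]
      simp [List.append_assoc]

-- the String-level form of pvJoin_shift
theorem pvJoin_shift_str (sep a x : String) (l : List String) :
    PySem.Str.join sep ((a ++ sep ++ x) :: l) = a ++ sep ++ PySem.Str.join sep (x :: l) := by
  apply String.toList_inj.mp
  simp [PySem.Str.join, String.toList_append, pvJoin_shift]

theorem pvJoin_singleton_str (sep a : String) : PySem.Str.join sep [a] = a := by
  apply String.toList_inj.mp
  simp [PySem.Str.join, PySem.Chars.join_singleton]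

-- the String-level form of PySem.Chars.join_cons_cons
theorem pvJoin_cons_cons_str (sep p q : String) (l : List String) :
    PySem.Str.join sep (p :: q :: l) = p ++ sep ++ PySem.Str.join sep (q :: l) := by
  apply String.toList_inj.mp
  simp [PySem.Str.join, String.toList_append, PySem.Chars.join_cons_cons, List.append_assoc]

-- invariant of A's loop: started at index i over xs (the last index being i + |xs| - 1),
-- it produces B's join-then-append form
theorem pvLoopA_eq (xs : List String) (h : xs ≠ []) :
    ∀ (i : Nat) (acc : String),
    pvLoopA (i + xs.length) (PySem.List.enumerate xs (i : Int)) acc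
      = PySem.Str.join ", which " (acc :: xs.dropLast) ++ ", and " ++ xs.getLast h := by
  induction xs with
  | nil => exact absurd rfl h
  | cons x t ih =>
      intro i acc
      cases t with
      | nil =>
          simp [PySem.List.enumerate_cons, PySem.List.enumerate_nil, pvLoopA,
            pvJoin_singleton_str]
      | cons y t' =>
          rw [PySem.List.enumerate_cons, pvLoopA]
          have hne : ((i : Int)) ≠ ((i + (x :: y :: t').length : Nat) : Int) - 1 := by
            simp [List.length_cons]; omega
          rw [if_neg hne]
          have hcast : ((i + (x :: y :: t').length : Nat) : Int)
              = (((i + 1) + (y :: t').length : Nat) : Int) := by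
            simp [List.length_cons]; omega
          have := ih (by simp) (i + 1) (acc ++ ", which " ++ x)
          rw [show ((i : Int) + 1) = (((i + 1 : Nat)) : Int) by push_cast; ring]
          rw [show (i + (x :: y :: t').length) = ((i + 1) + (y :: t').length) by
            simp [List.length_cons]; omega]
          rw [this, pvJoin_shift_str, List.dropLast_cons₂, pvJoin_cons_cons_str]
          simp [List.getLast_cons]

-- ===== VERDICT (by name: the statement is the Claim_ definition above) =====
theorem join_with_connectors_py_spec : Claim_equal_join_with_connectors_py := by
  intro parts _ hpre
  unfold Spec_join_with_connectors_py join_with_connectors_py join_with_connectors_py_alt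
  by_cases h1 : parts.length = 1
  · simp [h1]
  · by_cases h2 : parts.length = 2
    · simp [h2]
    · simp only [if_neg h1, if_neg h2]
      cases parts with
      | nil => exact absurd rfl hpre
      | cons p rest =>
          have hrne : rest ≠ [] := by
            intro hr; apply h1; simp [hr]
          rw [PySem.List.slice_from_one, PySem.List.slice_to_neg_one,
            PySem.List.pyGetD_neg_one _ _ hpre]
          simp only [List.tail_cons]
          have : (p :: rest).length = 1 + rest.length := by simp; omega
          have heq := pvLoopA_eq rest hrne 1 (PySem.List.pyGetD (p :: rest) 0 "")
          norm_num at heq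
          rw [PySem.List.pyGetD_zero_cons, this, heq]
          rw [List.getLast_cons hrne]
          cases rest with
          | nil => exact absurd rfl hrne
          | cons y t' => rw [List.dropLast_cons₂]
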